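-- pv_equiv track=rewrite | github.com/hrl13260130208/collector | collector/htmls.py | get_url_prefix_by_conf_num
-- ===== SOURCE A (Python) =====
-- def get_url_prefix_by_conf_num(url,conf_num):
--     '''
--     通过配置文件中url配置的数字来获取前缀
--     数字表示从右向左数的‘/’的个数
--     :param url:
--     :param conf_num:
--     :return:
--     '''
--     for i in range(conf_num):
--         num1 = url.rfind("/")
--         num2 = url.rfind("\\")
--         if num1 != -1:
--             if num2 != -1:
--                 if num2 < num1:
--                     num1 = num2
--             url =url[:num1]
--         else:
--             if num2 != -1:
--                 url = url[:num2]
--     return url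
-- ===== SOURCE B (Python) =====
-- def get_url_prefix_by_conf_num(url, conf_num):
--     """Index-table rewrite: collect separator positions once, then walk them
--     right-to-left, instead of rescanning the string with rfind each round."""
--     slashes = [i for i, ch in enumerate(url) if ch == '/']
--     backs = [i for i, ch in enumerate(url) if ch == '\\']
--     cut = len(url)
--     steps = 0
--     while steps < conf_num and (slashes or backs):
--         if slashes and backs:
--             cut = min(slashes[-1], backs[-1])
--         elif slashes:
--             cut = slashes[-1]
--         else:
--             cut = backs[-1]
--         while slashes and slashes[-1] >= cut:
--             slashes.pop()
--         while backs and backs[-1] >= cut: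
--             backs.pop()
--         steps += 1
--     return url[:cut]
-- ===== Notes on version B (the rewrite author's own statement) =====
-- stated objective: faster
-- what changed: B collects all '/' and '\' indices in one forward pass and then walks the index tables right-to-left (dropping entries past each cut) with an early stop when none remain, instead of A's re-scanning the shrinking string with rfind on every round.
import Mathlib
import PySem

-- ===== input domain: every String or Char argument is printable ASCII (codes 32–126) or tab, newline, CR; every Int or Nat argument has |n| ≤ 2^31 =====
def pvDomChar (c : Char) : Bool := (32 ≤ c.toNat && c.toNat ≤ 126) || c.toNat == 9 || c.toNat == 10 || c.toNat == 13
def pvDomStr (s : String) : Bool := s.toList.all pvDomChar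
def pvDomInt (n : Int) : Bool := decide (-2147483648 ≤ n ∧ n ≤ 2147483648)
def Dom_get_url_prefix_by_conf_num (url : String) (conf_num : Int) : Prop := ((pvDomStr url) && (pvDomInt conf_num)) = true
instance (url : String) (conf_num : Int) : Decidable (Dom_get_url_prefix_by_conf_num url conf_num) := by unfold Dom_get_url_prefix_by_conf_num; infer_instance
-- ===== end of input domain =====

-- B collects the '/' and '\' index tables in one pass and walks them
-- right-to-left instead of A's per-round rfind rescans of the shrinking string
-- (objective: faster; measured faster in a timing run); equal return value.

-- ===== PORT A =====
-- one iteration of A's for-loop body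
def pvStepA (u : List Char) : List Char :=
  let num1 := PySem.Chars.rfind u ['/']
  let num2 := PySem.Chars.rfind u ['\\']
  if num1 ≠ -1 then
    let num1' := if num2 ≠ -1 ∧ num2 < num1 then num2 else num1
    PySem.List.slice u none (some num1')
  else if num2 ≠ -1 then
    PySem.List.slice u none (some num2)
  else u

def get_url_prefix_by_conf_num (url : String) (conf_num : Int) : String :=
  String.ofList ((PySem.List.pyRange 0 conf_num 1).foldl (fun u _ => pvStepA u) url.toList)

-- ===== PORT B =====
-- [i for i, ch in enumerate(url) if ch == c]
def pvOccs (c : Char) (cs : List Char) : List Int :=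
  ((PySem.List.enumerate cs 0).filter (fun p => p.2 == c)).map (fun p => p.1)

-- Source B's while loop; the Python lists (popped from the back) are carried
-- REVERSED, so slashes[-1] is the head and the pop-while loops are dropWhile.
def pvAltLoop : Nat → List Int → List Int → Int → Int
  | 0, _, _, cut => cut
  | Nat.succ n, slashes, backs, cut =>
    match slashes, backs with
    | [], [] => cut
    | s :: S, b :: B =>
      let c := min s b
      pvAltLoop n ((s :: S).dropWhile (fun x => decide (c ≤ x)))
                  ((b :: B).dropWhile (fun x => decide (c ≤ x))) c
    | s :: S, [] =>
      pvAltLoop n ((s :: S).dropWhile (fun x => decide (s ≤ x))) [] s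
    | [], b :: B =>
      pvAltLoop n [] ((b :: B).dropWhile (fun x => decide (b ≤ x))) b

def get_url_prefix_by_conf_num_alt (url : String) (conf_num : Int) : String :=
  let cs := url.toList
  let cut := pvAltLoop conf_num.toNat (pvOccs '/' cs).reverse (pvOccs '\\' cs).reverse (cs.length : Int)
  String.ofList (PySem.List.slice cs none (some cut))

-- ===== PRECONDITION & SPEC =====
def Spec_get_url_prefix_by_conf_num (url : String) (conf_num : Int) (out : String) : Prop := out = get_url_prefix_by_conf_num_alt url conf_num
instance (url : String) (conf_num : Int) (out : String) : Decidable (Spec_get_url_prefix_by_conf_num url conf_num out) := by unfold Spec_get_url_prefix_by_conf_num; infer_instance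

-- ===== CLAIM (what is proved, stated in full; the proofs are below) =====
def Claim_equal_get_url_prefix_by_conf_num : Prop := ∀ (url : String) (conf_num : Int), Dom_get_url_prefix_by_conf_num url conf_num → Spec_get_url_prefix_by_conf_num url conf_num (get_url_prefix_by_conf_num url conf_num)

-- ===== LEMMAS AND PROOFS =====

lemma pvOccs_shift (c : Char) (cs : List Char) (s : Int) :
    ((PySem.List.enumerate cs s).filter (fun p => p.2 == c)).map (fun p => p.1)
      = (pvOccs c cs).map (fun x => x + s) := by
  induction cs generalizing s with
  | nil => simp [pvOccs, PySem.List.enumerate_nil]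
  | cons d cs ih =>
    simp only [pvOccs, PySem.List.enumerate_cons, List.filter_cons]
    by_cases hd : (d == c) = true
    · simp only [hd, if_true, List.map_cons, ih (s+1), ih (0+1)]
      simp only [pvOccs, List.map_map]
      refine congrArg₂ _ (by omega) ?_
      apply List.map_congr_left; intro x _; simp; omega
    · simp only [hd, Bool.false_eq_true, if_false, ih (s+1), ih (0+1)]
      simp only [pvOccs, List.map_map]
      apply List.map_congr_left; intro x _; simp; omega

lemma pvOccs_cons (c d : Char) (cs : List Char) :
    pvOccs c (d :: cs)
      = (if d = c then [(0 : Int)] else []) ++ (pvOccs c cs).map (fun x => x + 1) := by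
  simp only [pvOccs, PySem.List.enumerate_cons, List.filter_cons]
  by_cases hd : d = c
  · simp [hd, pvOccs_shift c cs 1, pvOccs]
  · simp [hd, (by simpa using hd : (d == c) = false), pvOccs_shift c cs 1, pvOccs]

lemma pvOccs_bounds (c : Char) (cs : List Char) :
    ∀ x ∈ pvOccs c cs, 0 ≤ x ∧ x < (cs.length : Int) := by
  induction cs with
  | nil => simp [pvOccs]
  | cons d cs ih =>
    intro x hx
    rw [pvOccs_cons] at hx
    rcases List.mem_append.1 hx with h | h
    · split at h <;> simp_all
    · obtain ⟨y, hy, rfl⟩ := List.mem_map.1 h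
      have := ih y hy
      simp only [List.length_cons]
      push_cast
      omega

lemma pvOccs_sorted (c : Char) (cs : List Char) :
    (pvOccs c cs).Pairwise (· < ·) := by
  induction cs with
  | nil => simp [pvOccs]
  | cons d cs ih =>
    rw [pvOccs_cons]
    refine List.pairwise_append.2 ⟨?_, ?_, ?_⟩
    · split <;> simp
    · exact List.pairwise_map.2 (ih.imp (by intro a b; omega))
    · intro x hx y hy
      split at hx
      · simp at hx
        obtain ⟨z, hz, rfl⟩ := List.mem_map.1 hy
        have := (pvOccs_bounds c cs z hz).1
        omega
      · simp at hx

lemma pvOccs_take (c : Char) (cs : List Char) (m : Nat) :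
    pvOccs c (cs.take m) = (pvOccs c cs).filter (fun x => decide (x < (m : Int))) := by
  induction cs generalizing m with
  | nil => simp [pvOccs]
  | cons d cs ih =>
    cases m with
    | zero =>
      have h0 : pvOccs c ([] : List Char) = [] := by simp [pvOccs]
      simp only [List.take_zero, h0]
      rw [eq_comm, List.filter_eq_nil_iff]
      intro x hx
      have := (pvOccs_bounds c (d :: cs) x hx).1
      simp; omega
    | succ m =>
      rw [List.take_succ_cons, pvOccs_cons, pvOccs_cons, ih, List.filter_append]
      congr 1
      · split <;> simp
      · rw [List.filter_map]
        apply congrArg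
        apply List.filter_congr
        intro x hx
        simp only [Function.comp_apply, decide_eq_decide]
        push_cast
        omega

lemma pv_go_zero (s sub : List Char) : PySem.Chars.rfind.go s sub 0 = if sub.isPrefixOf s then 0 else -1 := by
  simp [PySem.Chars.rfind.go]

lemma pv_go_succ (s sub : List Char) (j : Nat) : PySem.Chars.rfind.go s sub (j+1) =
    if sub.isPrefixOf (s.drop (j+1)) then ((j:Int)+1) else PySem.Chars.rfind.go s sub j := by
  rw [PySem.Chars.rfind.go]
  push_cast
  ring_nf

lemma pv_go_cons (c d : Char) (cs : List Char) : ∀ (n : Nat),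
    PySem.Chars.rfind.go (d :: cs) [c] (n+1)
      = (if PySem.Chars.rfind.go cs [c] n = -1 then (if d = c then 0 else -1)
         else PySem.Chars.rfind.go cs [c] n + 1) := by
  intro n
  induction n with
  | zero =>
    rw [pv_go_succ, pv_go_zero, pv_go_zero]
    simp only [List.drop_succ_cons, List.drop_zero]
    have hd : [c].isPrefixOf (d :: cs) = (c == d) := by simp [List.isPrefixOf]
    by_cases h : [c].isPrefixOf cs = true
    · simp [h]
    · simp only [h, Bool.false_eq_true, if_false, if_true, hd]
      by_cases hdc : d = c
      · simp [hdc]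
      · simp only [hdc, if_false]
        rw [if_neg]
        intro h
        exact hdc (beq_iff_eq.1 h).symm
  | succ j ih =>
    rw [pv_go_succ, ih, pv_go_succ]
    simp only [List.drop_succ_cons]
    by_cases h : [c].isPrefixOf (cs.drop (j+1)) = true
    · simp only [h, if_true]
      rw [if_neg (by omega)]
      push_cast
      ring
    · simp only [h, Bool.false_eq_true, if_false]

lemma pv_rfind_cons (c d : Char) (cs : List Char) :
    PySem.Chars.rfind (d :: cs) [c]
      = (if PySem.Chars.rfind cs [c] = -1 then (if d = c then 0 else -1)
         else PySem.Chars.rfind cs [c] + 1) := by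
  show PySem.Chars.rfind.go _ _ (cs.length + 1) = _
  rw [pv_go_cons]
  rfl

lemma pv_rfind_nil (c : Char) : PySem.Chars.rfind [] [c] = -1 := by
  show PySem.Chars.rfind.go _ _ 0 = -1
  rw [pv_go_zero]
  simp [List.isPrefixOf]

lemma pv_rfind_eq (c : Char) (cs : List Char) :
    PySem.Chars.rfind cs [c] = (pvOccs c cs).getLastD (-1) := by
  induction cs with
  | nil => rw [pv_rfind_nil]; simp [pvOccs]
  | cons d cs ih =>
    rw [pv_rfind_cons, ih, pvOccs_cons]
    rcases heq : pvOccs c cs with _ | ⟨x, xs⟩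
    · simp only [List.map_nil, List.append_nil, List.getLastD_nil, if_true]
      split <;> simp
    · have hlast : (x :: xs).getLastD (-1) = (x :: xs).getLast (List.cons_ne_nil x xs) := by
        simp [List.getLastD_eq_getLast?, List.getLast?_eq_some_getLast]
      have hmem : (x :: xs).getLast (List.cons_ne_nil x xs) ∈ pvOccs c cs := by
        rw [heq]; exact List.getLast_mem _
      have hge := (pvOccs_bounds c cs _ hmem).1
      rw [if_neg (by omega)]
      have hmapne : (x :: xs).map (fun y => y + 1) ≠ [] := by simp
      conv_rhs => rw [List.getLastD_eq_getLast?]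
      rw [List.getLast?_append_of_ne_nil _ hmapne, List.getLast?_map,
          List.getLast?_eq_some_getLast (List.cons_ne_nil x xs)]
      simp [List.getLast?_eq_some_getLast (List.cons_ne_nil x xs)]

lemma pv_dropWhile_desc (L : List Int) (c : Int) (h : L.Pairwise (· > ·)) :
    L.dropWhile (fun x => decide (c ≤ x)) = L.filter (fun x => decide (x < c)) := by
  induction L with
  | nil => simp
  | cons x L ih =>
    rw [List.pairwise_cons] at h
    by_cases hx : c ≤ x
    · rw [List.dropWhile_cons_of_pos (by simpa using hx),
        List.filter_cons_of_neg (by simpa using hx), ih h.2]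
    · rw [List.dropWhile_cons_of_neg (by simpa using hx),
        List.filter_cons_of_pos (by simp; omega)]
      congr 1
      rw [eq_comm]
      apply List.filter_eq_self.2
      intro y hy
      have := h.1 y hy
      simp; omega

lemma pvAltLoop_nonneg : ∀ (n : Nat) (S B : List Int) (cut : Int),
    0 ≤ cut → (∀ x ∈ S, 0 ≤ x) → (∀ x ∈ B, 0 ≤ x) → 0 ≤ pvAltLoop n S B cut := by
  intro n
  induction n with
  | zero => intro S B cut h _ _; exact h
  | succ n ih =>
    intro S B cut hc hS hB
    match S, B with
    | [], [] => exact hc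
    | s :: S, b :: B =>
      apply ih
      · have := hS s (by simp); have := hB b (by simp); simp only [le_min_iff]; omega
      · intro x hx
        exact hS x ((List.dropWhile_sublist _).subset hx)
      · intro x hx
        exact hB x ((List.dropWhile_sublist _).subset hx)
    | s :: S, [] =>
      apply ih
      · exact hS s (by simp)
      · intro x hx
        exact hS x ((List.dropWhile_sublist _).subset hx)
      · simp
    | [], b :: B =>
      apply ih
      · exact hB b (by simp)
      · simp
      · intro x hx
        exact hB x ((List.dropWhile_sublist _).subset hx)

-- loop bisimulation helpers and proof

lemma pvAltLoop_nil (n : Nat) (cut : Int) : pvAltLoop n [] [] cut = cut := by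
  cases n <;> rfl

lemma pv_occs_rev_eq (c : Char) (u : List Char) {l : List Int}
    (h : (pvOccs c u).reverse = l) : pvOccs c u = l.reverse := by
  rw [← h, List.reverse_reverse]

lemma pv_take_eq (cs : List Char) (cutN : Nat) (c : Int) (hc0 : 0 ≤ c)
    (hlt : c < (cutN : Int)) : (cs.take cutN).take c.toNat = cs.take c.toNat := by
  rw [List.take_take]
  congr 1
  omega

lemma pv_advance (cs : List Char) (cutN : Nat) (c : Int)
    (hc0 : 0 ≤ c) (hlt : c < (cutN : Int)) (ch : Char) :
    ((pvOccs ch (cs.take cutN)).reverse).dropWhile (fun x => decide (c ≤ x))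
      = (pvOccs ch (cs.take c.toNat)).reverse := by
  have hdesc : ((pvOccs ch (cs.take cutN)).reverse).Pairwise (· > ·) := by
    rw [List.pairwise_reverse]
    exact pvOccs_sorted ch (cs.take cutN)
  rw [pv_dropWhile_desc _ _ hdesc, List.filter_reverse]
  congr 1
  conv_rhs => rw [← pv_take_eq cs cutN c hc0 hlt, pvOccs_take]
  rw [Int.toNat_of_nonneg hc0]

lemma pv_last_of_rev (s : Int) (S : List Int) :
    ((s :: S).reverse : List Int).getLastD (-1) = s := by
  rw [List.getLastD_eq_getLast?, List.getLast?_reverse]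
  rfl

lemma pv_main (cs : List Char) : ∀ (n : Nat) (cutN : Nat), cutN ≤ cs.length →
    pvStepA^[n] (cs.take cutN)
      = cs.take ((pvAltLoop n (pvOccs '/' (cs.take cutN)).reverse
          (pvOccs '\\' (cs.take cutN)).reverse (cutN : Int)).toNat) := by
  intro n
  induction n with
  | zero =>
    intro cutN h
    simp [pvAltLoop]
  | succ n ih =>
    intro cutN h
    have hlen : (cs.take cutN).length = cutN := by
      simp [List.length_take]
      omega
    rcases hS : (pvOccs '/' (cs.take cutN)).reverse with _ | ⟨s, S'⟩
    · rcases hB : (pvOccs '\\' (cs.take cutN)).reverse with _ | ⟨b, B'⟩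
      · -- no separator left: A's step is the identity, B stops
        have hso := pv_occs_rev_eq _ _ hS
        have hbo := pv_occs_rev_eq _ _ hB
        simp only [List.reverse_nil] at hso hbo
        have hstep : pvStepA (cs.take cutN) = cs.take cutN := by
          unfold pvStepA
          rw [pv_rfind_eq, pv_rfind_eq, hso, hbo]
          simp
        rw [Function.iterate_succ_apply, hstep]
        have hred : pvAltLoop (n + 1) [] [] (cutN : Int) = (cutN : Int) := pvAltLoop_nil _ _
        rw [hred]
        have := ih cutN h
        rw [hS, hB, pvAltLoop_nil] at this
        rw [this]
      · -- only backslashes left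
        have hso := pv_occs_rev_eq _ _ hS
        have hbo := pv_occs_rev_eq _ _ hB
        simp only [List.reverse_nil] at hso
        have hbmem : b ∈ pvOccs '\\' (cs.take cutN) := by
          rw [hbo]; simp
        obtain ⟨hb0, hblt⟩ := pvOccs_bounds _ _ b hbmem
        rw [hlen] at hblt
        have hstep : pvStepA (cs.take cutN) = cs.take b.toNat := by
          unfold pvStepA
          rw [pv_rfind_eq, pv_rfind_eq, hso, hbo, pv_last_of_rev]
          simp only [List.getLastD_nil, ne_eq, not_true_eq_false, if_false]
          rw [if_pos (by omega), PySem.List.slice_to _ hb0, pv_take_eq cs cutN b hb0 hblt]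
        have hdropb := pv_advance cs cutN b hb0 hblt '\\'
        rw [hB] at hdropb
        have hemptys : (pvOccs '/' (cs.take b.toNat)).reverse = ([] : List Int) := by
          rw [← pv_take_eq cs cutN b hb0 hblt, pvOccs_take, hso]
          simp
        rw [Function.iterate_succ_apply, hstep]
        have hred : pvAltLoop (n + 1) [] (b :: B') (cutN : Int)
            = pvAltLoop n [] ((b :: B').dropWhile (fun x => decide (b ≤ x))) b := rfl
        rw [hred, hdropb]
        have := ih b.toNat (by omega)
        rw [hemptys, Int.toNat_of_nonneg hb0] at this
        rw [this]
    · rcases hB : (pvOccs '\\' (cs.take cutN)).reverse with _ | ⟨b, B'⟩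
      · -- only slashes left
          have hso := pv_occs_rev_eq _ _ hS
          have hbo := pv_occs_rev_eq _ _ hB
          simp only [List.reverse_nil] at hbo
          have hsmem : s ∈ pvOccs '/' (cs.take cutN) := by
            rw [hso]; simp
          obtain ⟨hs0, hslt⟩ := pvOccs_bounds _ _ s hsmem
          rw [hlen] at hslt
          have hstep : pvStepA (cs.take cutN) = cs.take s.toNat := by
            unfold pvStepA
            rw [pv_rfind_eq, pv_rfind_eq, hso, hbo, pv_last_of_rev]
            simp only [List.getLastD_nil, ne_eq]
            rw [if_pos (by omega), if_neg (by simp)]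
            rw [PySem.List.slice_to _ hs0, pv_take_eq cs cutN s hs0 hslt]
          have hdrops := pv_advance cs cutN s hs0 hslt '/'
          rw [hS] at hdrops
          have hemptyb : (pvOccs '\\' (cs.take s.toNat)).reverse = ([] : List Int) := by
            rw [← pv_take_eq cs cutN s hs0 hslt, pvOccs_take, hbo]
            simp
          rw [Function.iterate_succ_apply, hstep]
          have hred : pvAltLoop (n + 1) (s :: S') [] (cutN : Int)
              = pvAltLoop n ((s :: S').dropWhile (fun x => decide (s ≤ x))) [] s := rfl
          rw [hred, hdrops]
          have := ih s.toNat (by omega)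
          rw [hemptyb, Int.toNat_of_nonneg hs0] at this
          rw [this]
      · -- both kinds present: A cuts at the leftmost of the two last separators
        have hso := pv_occs_rev_eq _ _ hS
        have hbo := pv_occs_rev_eq _ _ hB
        have hsmem : s ∈ pvOccs '/' (cs.take cutN) := by
          rw [hso]; simp
        have hbmem : b ∈ pvOccs '\\' (cs.take cutN) := by
          rw [hbo]; simp
        obtain ⟨hs0, hslt⟩ := pvOccs_bounds _ _ s hsmem
        obtain ⟨hb0, hblt⟩ := pvOccs_bounds _ _ b hbmem
        rw [hlen] at hslt hblt
        have hc0 : 0 ≤ min s b := by omega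
        have hclt : min s b < (cutN : Int) := by omega
        have hstep : pvStepA (cs.take cutN) = cs.take (min s b).toNat := by
          unfold pvStepA
          rw [pv_rfind_eq, pv_rfind_eq, hso, hbo, pv_last_of_rev, pv_last_of_rev]
          rw [if_pos (by omega)]
          by_cases hbs : b < s
          · rw [if_pos ⟨by omega, hbs⟩, PySem.List.slice_to _ hb0,
              show min s b = b by omega, pv_take_eq cs cutN b hb0 hblt]
          · rw [if_neg (by omega), PySem.List.slice_to _ hs0,
              show min s b = s by omega, pv_take_eq cs cutN s hs0 hslt]
        have hdrops := pv_advance cs cutN (min s b) hc0 hclt '/'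
        have hdropb := pv_advance cs cutN (min s b) hc0 hclt '\\'
        rw [hS] at hdrops
        rw [hB] at hdropb
        rw [Function.iterate_succ_apply, hstep]
        have hred : pvAltLoop (n + 1) (s :: S') (b :: B') (cutN : Int)
            = pvAltLoop n ((s :: S').dropWhile (fun x => decide (min s b ≤ x)))
                ((b :: B').dropWhile (fun x => decide (min s b ≤ x))) (min s b) := rfl
        rw [hred, hdrops, hdropb]
        have := ih (min s b).toNat (by omega)
        rw [Int.toNat_of_nonneg hc0] at this
        rw [this]

-- ===== VERDICT (by name: the statement is the Claim_ definition above) =====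
theorem get_url_prefix_by_conf_num_spec : Claim_equal_get_url_prefix_by_conf_num := by
  intro url conf_num _
  unfold Spec_get_url_prefix_by_conf_num
  unfold get_url_prefix_by_conf_num get_url_prefix_by_conf_num_alt
  rw [List.foldl_const pvStepA url.toList]
  rw [PySem.List.length_pyRange_one]
  show String.ofList (pvStepA^[(conf_num - 0).toNat] url.toList)
      = String.ofList (PySem.List.slice url.toList none (some (pvAltLoop conf_num.toNat
          (pvOccs '/' url.toList).reverse (pvOccs '\\' url.toList).reverse (url.toList.length : Int))))
  have hmain := pv_main url.toList conf_num.toNat url.toList.length (le_refl _)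
  rw [List.take_length] at hmain
  have hpos : 0 ≤ pvAltLoop conf_num.toNat (pvOccs '/' url.toList).reverse
      (pvOccs '\\' url.toList).reverse (url.toList.length : Int) := by
    apply pvAltLoop_nonneg
    · positivity
    · intro x hx
      exact (pvOccs_bounds _ _ x (by simpa using hx)).1
    · intro x hx
      exact (pvOccs_bounds _ _ x (by simpa using hx)).1
  rw [PySem.List.slice_to url.toList hpos]
  rw [show (conf_num - 0).toNat = conf_num.toNat by norm_num]
  rw [hmain]
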